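-- pv_equiv track=rewrite | github.com/nittinkumarhr/HackIndia-Spark_8_2025_Hi-Idea- | backend.py | segment_stroke
-- ===== SOURCE A (Python) =====
-- def segment_stroke(stroke):
--     if len(stroke) < 20:
--         return [stroke]
--     segments = []
--     current_segment = [stroke[0]]
--     x_vals = [p[0] for p in stroke]
--     x_min, x_max = min(x_vals), max(x_vals)
--     x_range = x_max - x_min
--     threshold = x_range / 4 if x_range > 0 else 10
--     for i in range(1, len(stroke)):
--         prev_x = stroke[i-1][0]
--         curr_x = stroke[i][0]
--         if abs(curr_x - prev_x) > threshold and len(current_segment) > 10: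
--             segments.append(current_segment)
--             current_segment = [stroke[i]]
--         else:
--             current_segment.append(stroke[i])
--     if len(current_segment) > 10:
--         segments.append(current_segment)
--     return segments
-- ===== SOURCE B (Python) =====
-- def segment_stroke(stroke):
--     n = len(stroke)
--     if n < 20:
--         return [stroke]
--     x_vals = [p[0] for p in stroke]
--     x_range = max(x_vals) - min(x_vals)
--     threshold = x_range / 4 if x_range > 0 else 10
--     boundaries = []
--     last = 0
--     for i in range(1, n):
--         if abs(stroke[i][0] - stroke[i - 1][0]) > threshold and i - last > 10:
--             boundaries.append(i)
--             last = i
--     cuts = [0] + boundaries + [n]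
--     segs = [stroke[a:b] for a, b in zip(cuts, cuts[1:])]
--     if len(segs[-1]) <= 10:
--         segs.pop()
--     return segs
-- ===== Notes on version B (the rewrite author's own statement) =====
-- stated objective: alternative
-- what changed: A accumulates the current segment point-by-point in one pass; B first scans once for boundary indices (large x-jump at least 11 points after the previous cut), then materialises the segments as slices between consecutive cuts, dropping a short final slice.
import Mathlib
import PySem

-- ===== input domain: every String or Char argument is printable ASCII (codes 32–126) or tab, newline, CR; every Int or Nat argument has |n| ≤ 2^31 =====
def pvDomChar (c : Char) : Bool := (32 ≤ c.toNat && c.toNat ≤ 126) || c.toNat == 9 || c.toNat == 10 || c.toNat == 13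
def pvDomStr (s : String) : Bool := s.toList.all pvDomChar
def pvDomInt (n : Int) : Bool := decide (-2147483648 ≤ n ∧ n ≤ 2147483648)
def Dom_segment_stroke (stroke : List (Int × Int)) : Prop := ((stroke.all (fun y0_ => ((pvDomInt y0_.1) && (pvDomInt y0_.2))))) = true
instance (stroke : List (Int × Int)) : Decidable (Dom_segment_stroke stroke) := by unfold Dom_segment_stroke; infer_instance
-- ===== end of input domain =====

-- B replaces A's point-by-point segment accumulation by a boundary-index scan followed by
-- slicing between consecutive cuts (return value only; neither program mutates its argument).

-- ===== PORT A =====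
-- Python's `abs(curr_x - prev_x) > threshold` with threshold = x_range/4 (a float) or 10 is
-- ported as `x_range < 4*|d|` (resp. `10 < |d|`): exact, because on Dom all values fit well
-- below 2^53, so the float division by 4 and the int/float comparison are exact.
-- loop body of A's `for i in range(1, len(stroke))`; stroke[i-1], stroke[i] are in range there,
-- so `getD` with a dummy default is exact
def pvStepA (stroke : List (Int × Int)) (xr : Int)
    (st : List (List (Int × Int)) × List (Int × Int)) (i : Nat) :
    List (List (Int × Int)) × List (Int × Int) :=
  let prev_x := (stroke.getD (i - 1) (0, 0)).1
  let curr_x := (stroke.getD i (0, 0)).1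
  if (if 0 < xr then xr < 4 * |curr_x - prev_x| else (10 : Int) < |curr_x - prev_x|)
      ∧ 10 < st.2.length then
    (st.1 ++ [st.2], [stroke.getD i (0, 0)])
  else
    (st.1, st.2 ++ [stroke.getD i (0, 0)])

def segment_stroke (stroke : List (Int × Int)) : List (List (Int × Int)) :=
  if stroke.length < 20 then [stroke] else
  let x_vals := stroke.map Prod.fst
  -- x_vals is nonempty on this branch, so min()/max() do not raise and getD's default is unused
  let x_min := (PySem.List.min? x_vals (fun x => x)).getD 0
  let x_max := (PySem.List.max? x_vals (fun x => x)).getD 0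
  let x_range := x_max - x_min
  -- `for i in range(1, len(stroke))`
  let r := (List.range' 1 (stroke.length - 1)).foldl (pvStepA stroke x_range)
    ([], [stroke.headD (0, 0)])
  if 10 < r.2.length then r.1 ++ [r.2] else r.1

-- ===== PORT B =====
-- loop body of B's boundary scan (same exact porting of the float threshold as in A)
def pvStepB (stroke : List (Int × Int)) (xr : Int)
    (st : List Nat × Nat) (i : Nat) : List Nat × Nat :=
  let d := |(stroke.getD i (0, 0)).1 - (stroke.getD (i - 1) (0, 0)).1|
  if (if 0 < xr then xr < 4 * d else (10 : Int) < d) ∧ 10 < i - st.2 then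
    (st.1 ++ [i], i)
  else st

def segment_stroke_alt (stroke : List (Int × Int)) : List (List (Int × Int)) :=
  let n := stroke.length
  if n < 20 then [stroke] else
  let x_vals := stroke.map Prod.fst
  let x_range := (PySem.List.max? x_vals (fun x => x)).getD 0
                 - (PySem.List.min? x_vals (fun x => x)).getD 0
  let bl := (List.range' 1 (n - 1)).foldl (pvStepB stroke x_range) ([], 0)
  let cuts := (0 :: bl.1) ++ [n]
  -- `[stroke[a:b] for a, b in zip(cuts, cuts[1:])]`
  let segs := (cuts.zip cuts.tail).map
    (fun p => PySem.List.slice stroke (some (p.1 : Int)) (some (p.2 : Int)))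
  -- `if len(segs[-1]) <= 10: segs.pop()`; segs is nonempty (cuts has ≥ 2 entries)
  if (segs.getLastD []).length ≤ 10 then segs.dropLast else segs

-- ===== PRECONDITION & SPEC =====
def Spec_segment_stroke (stroke : List (Int × Int)) (out : List (List (Int × Int))) : Prop := out = segment_stroke_alt stroke
instance (stroke : List (Int × Int)) (out : List (List (Int × Int))) : Decidable (Spec_segment_stroke stroke out) := by unfold Spec_segment_stroke; infer_instance

-- ===== CLAIM (what is proved, stated in full; the proofs are below) =====
def Claim_equal_segment_stroke : Prop := ∀ (stroke : List (Int × Int)), Dom_segment_stroke stroke → Spec_segment_stroke stroke (segment_stroke stroke)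

-- ===== LEMMAS AND PROOFS =====

-- stroke[a:b] for 0 ≤ a ≤ b
def pvSeg (l : List (Int × Int)) (a b : Nat) : List (Int × Int) := (l.drop a).take (b - a)

-- the segments between consecutive cut indices
def pvSlices (l : List (Int × Int)) : List Nat → List (List (Int × Int))
  | a :: b :: r => pvSeg l a b :: pvSlices l (b :: r)
  | _ => []

theorem pvSlices_append (l : List (Int × Int)) (c : List Nat) (i : Nat) (h : c ≠ []) :
    pvSlices l (c ++ [i]) = pvSlices l c ++ [pvSeg l (c.getLastD 0) i] := by
  induction c with
  | nil => simp at h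
  | cons a t ih =>
    cases t with
    | nil => simp [pvSlices]
    | cons b r =>
      have := ih (by simp)
      simp only [List.cons_append] at this
      simp only [List.cons_append, pvSlices, this, List.getLastD_cons]

theorem pvZip_map_eq_slices (l : List (Int × Int)) (c : List Nat) :
    (c.zip c.tail).map (fun p => PySem.List.slice l (some (p.1 : Int)) (some (p.2 : Int)))
      = pvSlices l c := by
  induction c with
  | nil => simp [pvSlices]
  | cons a t ih =>
    cases t with
    | nil => simp [pvSlices]
    | cons b r => simpa [pvSlices, PySem.List.slice_natCast, pvSeg] using ih

theorem pvSeg_len (l : List (Int × Int)) (a b : Nat) (_h1 : a ≤ b) (h2 : b ≤ l.length) :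
    (pvSeg l a b).length = b - a := by
  simp [pvSeg]; omega

theorem pvSeg_single (l : List (Int × Int)) (i : Nat) (h : i < l.length) :
    pvSeg l i (i + 1) = [l.getD i (0, 0)] := by
  simp only [pvSeg, Nat.add_sub_cancel_left]
  rw [List.take_one_drop_eq_of_lt_length h, List.getD_eq_getElem l (0,0) h]
  simp

theorem pvSeg_snoc (l : List (Int × Int)) (a i : Nat) (h1 : a ≤ i) (h2 : i < l.length) :
    pvSeg l a (i + 1) = pvSeg l a i ++ [l.getD i (0, 0)] := by
  have hd : i - a < (l.drop a).length := by rw [List.length_drop]; omega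
  simp only [pvSeg]
  rw [show i + 1 - a = (i - a) + 1 by omega, List.take_add_one]
  rw [List.getElem?_eq_getElem hd]
  simp only [Option.toList_some]
  congr 1
  rw [List.getElem_drop, List.getD_eq_getElem l (0,0) h2]
  have hia : a + (i - a) = i := by omega
  simp only [hia]

theorem pvGetLastD_snoc {α : Type} (c : List α) (i : α) : ∀ d, (c ++ [i]).getLastD d = i := by
  induction c with
  | nil => intro d; rfl
  | cons a t ih => intro d; rw [List.cons_append, List.getLastD_cons]; exact ih a

theorem pv_loop_inv (stroke : List (Int × Int)) (xr : Int) :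
    ∀ (k i last : Nat) (bl : List Nat),
      last < i → i + k ≤ stroke.length → last = (0 :: bl).getLastD 0 →
      (List.range' i k).foldl (pvStepA stroke xr)
          (pvSlices stroke (0 :: bl), pvSeg stroke last i)
        = (pvSlices stroke (0 :: ((List.range' i k).foldl (pvStepB stroke xr) (bl, last)).1),
            pvSeg stroke ((List.range' i k).foldl (pvStepB stroke xr) (bl, last)).2 (i + k))
      ∧ ((List.range' i k).foldl (pvStepB stroke xr) (bl, last)).2
          = (0 :: ((List.range' i k).foldl (pvStepB stroke xr) (bl, last)).1).getLastD 0
      ∧ ((List.range' i k).foldl (pvStepB stroke xr) (bl, last)).2 < i + k := by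
  intro k
  induction k with
  | zero =>
    intro i last bl h1 h2 h3
    simp only [List.range'_zero, List.foldl_nil]
    exact ⟨by simp, h3, by omega⟩
  | succ k ih =>
    intro i last bl h1 h2 h3
    rw [List.range'_succ]
    simp only [List.foldl_cons]
    have hlen : (pvSeg stroke last i).length = i - last :=
      pvSeg_len stroke last i (by omega) (by omega)
    have hC : ∀ (P : Prop) [Decidable P],
        (P ∧ 10 < (pvSeg stroke last i).length) = (P ∧ 10 < i - last) := by
      intro P _; rw [hlen]
    by_cases hcond : (if 0 < xr then
          xr < 4 * |(stroke.getD i (0, 0)).1 - (stroke.getD (i - 1) (0, 0)).1|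
        else (10 : Int) < |(stroke.getD i (0, 0)).1 - (stroke.getD (i - 1) (0, 0)).1|)
        ∧ 10 < i - last
    · have hA : pvStepA stroke xr (pvSlices stroke (0 :: bl), pvSeg stroke last i) i
          = (pvSlices stroke (0 :: (bl ++ [i])), pvSeg stroke i (i + 1)) := by
        simp only [pvStepA]
        rw [if_pos (by rw [hC]; exact hcond)]
        rw [show (0 :: (bl ++ [i])) = (0 :: bl) ++ [i] by simp,
            pvSlices_append stroke (0 :: bl) i (by simp), ← h3,
            pvSeg_single stroke i (by omega)]
      have hB : pvStepB stroke xr (bl, last) i = (bl ++ [i], i) := by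
        simp only [pvStepB]
        rw [if_pos hcond]
      rw [hA, hB]
      have := ih (i + 1) i (bl ++ [i]) (by omega) (by omega) (by rw [show (0 :: (bl ++ [i])) = (0 :: bl) ++ [i] from rfl, pvGetLastD_snoc])
      rw [show i + 1 + k = i + (k + 1) by omega] at this
      exact this
    · have hA : pvStepA stroke xr (pvSlices stroke (0 :: bl), pvSeg stroke last i) i
          = (pvSlices stroke (0 :: bl), pvSeg stroke last (i + 1)) := by
        simp only [pvStepA]
        rw [if_neg (by rw [hC]; exact hcond)]
        rw [pvSeg_snoc stroke last i (by omega) (by omega)]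
      have hB : pvStepB stroke xr (bl, last) i = (bl, last) := by
        simp only [pvStepB]
        rw [if_neg hcond]
      rw [hA, hB]
      have := ih (i + 1) last bl (by omega) (by omega) h3
      rw [show i + 1 + k = i + (k + 1) by omega] at this
      exact this

theorem segment_stroke_spec : Claim_equal_segment_stroke := by
  intro stroke _
  show segment_stroke stroke = segment_stroke_alt stroke
  by_cases h20 : stroke.length < 20
  · simp [segment_stroke, segment_stroke_alt, h20]
  · have hne : stroke ≠ [] := by intro h; rw [h] at h20; simp at h20
    have hn1 : 1 + (stroke.length - 1) = stroke.length := by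
      cases stroke with
      | nil => exact absurd rfl hne
      | cons a t => simp; omega
    simp only [segment_stroke, segment_stroke_alt, h20, if_false]
    set xr := (PySem.List.max? (stroke.map Prod.fst) (fun x => x)).getD 0
        - (PySem.List.min? (stroke.map Prod.fst) (fun x => x)).getD 0 with hxr
    set Bf := (List.range' 1 (stroke.length - 1)).foldl (pvStepB stroke xr) ([], 0) with hBf
    obtain ⟨hfold, hlastEq, hlastLt⟩ :=
      pv_loop_inv stroke xr (stroke.length - 1) 1 0 [] (by omega) (by omega) rfl
    rw [← hBf, hn1] at hfold hlastLt
    have hinit : (([], [stroke.headD (0, 0)]) :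
        List (List (Int × Int)) × List (Int × Int)) = (pvSlices stroke [0], pvSeg stroke 0 1) := by
      cases stroke with
      | nil => exact absurd rfl hne
      | cons a t => simp [pvSlices, pvSeg]
    rw [hinit, hfold]
    rw [pvZip_map_eq_slices stroke ((0 :: Bf.1) ++ [stroke.length]),
        pvSlices_append stroke (0 :: Bf.1) stroke.length (by simp), ← hlastEq,
        pvGetLastD_snoc]
    have hlen : (pvSeg stroke Bf.2 stroke.length).length = stroke.length - Bf.2 :=
      pvSeg_len stroke Bf.2 stroke.length (by omega) (by omega)
    rw [hlen]
    by_cases hle : stroke.length - Bf.2 ≤ 10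
    · rw [if_neg (by omega), if_pos hle, List.dropLast_concat]
    · rw [if_pos (by omega), if_neg hle]
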